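-- pv_equiv track=rewrite | github.com/SpencerNinja/practice-coding | Python/CS1400and1410/word_zap/main.py | convertToLower
-- ===== SOURCE A (Python) =====
-- def convertToLower(word):
--     lowerWord = ""
--     upper = "ABCDEFGHIJKLMNOPQRSTUVWXYZ"
--     lower = "abcdefghijklmnopqrstuvwxyz"
--     for letter in word:
--         for char in range(len(upper)):
--             if letter == upper[char]:
--                 lowerWord = lowerWord + lower[char]
--             elif letter == lower[char]:
--                 lowerWord = lowerWord + letter
--     return lowerWord
-- ===== SOURCE B (Python) =====
-- def convertToLower(word):
--     # Single pass: keep only ASCII letters, lowercasing uppercase ones.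
--     return "".join(
--         chr(ord(c) + 32) if 'A' <= c <= 'Z' else c
--         for c in word
--         if 'a' <= c <= 'z' or 'A' <= c <= 'Z'
--     )
-- ===== Notes on version B (the rewrite author's own statement) =====
-- stated objective: simpler
-- what changed: Replaces A's nested loop (for each character, a scan over all 26 alphabet positions comparing against both case alphabets) by a single pass that keeps ASCII letters and lowercases them via chr(ord(c)+32).
import Mathlib
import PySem

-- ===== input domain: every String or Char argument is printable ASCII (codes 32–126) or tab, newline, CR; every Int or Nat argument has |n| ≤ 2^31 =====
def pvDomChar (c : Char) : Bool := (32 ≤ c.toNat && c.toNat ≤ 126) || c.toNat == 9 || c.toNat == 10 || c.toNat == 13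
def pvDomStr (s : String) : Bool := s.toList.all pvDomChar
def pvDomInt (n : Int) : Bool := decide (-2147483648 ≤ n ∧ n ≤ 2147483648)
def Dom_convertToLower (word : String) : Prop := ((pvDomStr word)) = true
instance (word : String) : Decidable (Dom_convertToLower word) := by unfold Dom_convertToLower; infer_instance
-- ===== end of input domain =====

-- B replaces A's nested 26-position alphabet scan per character by a single filtering pass
-- over the word that keeps ASCII letters, lowercased; objective: simpler.

-- ===== PORT A =====
-- Literal port of A: for each letter, scan all 26 alphabet positions (the two string
-- constants are inlined). Both indexings are always in range (char ∈ range(26)), so the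
-- pyGetD default ' ' is unreachable.
def convertToLower (word : String) : String :=
  String.ofList (word.toList.foldl (fun lowerWord letter =>
    (PySem.List.pyRange 0 (("ABCDEFGHIJKLMNOPQRSTUVWXYZ".toList : List Char).length) 1).foldl
      (fun lowerWord char =>
        if letter = PySem.List.pyGetD "ABCDEFGHIJKLMNOPQRSTUVWXYZ".toList char ' ' then
          lowerWord ++ [PySem.List.pyGetD "abcdefghijklmnopqrstuvwxyz".toList char ' ']
        else if letter = PySem.List.pyGetD "abcdefghijklmnopqrstuvwxyz".toList char ' ' then
          lowerWord ++ [letter]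
        else lowerWord) lowerWord) [])

-- ===== PORT B =====
-- Port of B: one filterMap pass (the Python generator expression with its `if` filter).
def convertToLower_alt (word : String) : String :=
  String.ofList (word.toList.filterMap (fun c =>
    if ('a' ≤ c ∧ c ≤ 'z') ∨ ('A' ≤ c ∧ c ≤ 'Z') then
      some (if 'A' ≤ c ∧ c ≤ 'Z' then Char.ofNat (c.toNat + 32) else c)
    else none))

-- ===== PRECONDITION & SPEC =====
def Spec_convertToLower (word : String) (out : String) : Prop := out = convertToLower_alt word
instance (word : String) (out : String) : Decidable (Spec_convertToLower word out) := by unfold Spec_convertToLower; infer_instance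

-- ===== CLAIM (what is proved, stated in full; the proofs are below) =====
def Claim_equal_convertToLower : Prop := ∀ (word : String), Dom_convertToLower word → Spec_convertToLower word (convertToLower word)

-- ===== LEMMAS AND PROOFS =====

-- B's per-character mapping, and its contribution as a list (empty = dropped).
def bFun (c : Char) : Option Char :=
  if ('a' ≤ c ∧ c ≤ 'z') ∨ ('A' ≤ c ∧ c ≤ 'Z') then
    some (if 'A' ≤ c ∧ c ≤ 'Z' then Char.ofNat (c.toNat + 32) else c)
  else none

-- The per-character agreement, checked once for every code below 127 (the domain's chars).
set_option maxRecDepth 100000 in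
lemma key_ofNat : ∀ n : Nat, n < 127 →
    (PySem.List.pyRange 0 (("ABCDEFGHIJKLMNOPQRSTUVWXYZ".toList : List Char).length) 1).flatMap
      (fun char =>
        if Char.ofNat n = PySem.List.pyGetD "ABCDEFGHIJKLMNOPQRSTUVWXYZ".toList char ' ' then
          [PySem.List.pyGetD "abcdefghijklmnopqrstuvwxyz".toList char ' ']
        else if Char.ofNat n = PySem.List.pyGetD "abcdefghijklmnopqrstuvwxyz".toList char ' ' then
          [Char.ofNat n]
        else [])
    = (bFun (Char.ofNat n)).toList := by decide

-- A's inner 26-step loop appends exactly B's contribution for that character.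
lemma inner_append (letter : Char) (h : letter.toNat < 127) (acc : List Char) :
    (PySem.List.pyRange 0 (("ABCDEFGHIJKLMNOPQRSTUVWXYZ".toList : List Char).length) 1).foldl
      (fun lowerWord char =>
        if letter = PySem.List.pyGetD "ABCDEFGHIJKLMNOPQRSTUVWXYZ".toList char ' ' then
          lowerWord ++ [PySem.List.pyGetD "abcdefghijklmnopqrstuvwxyz".toList char ' ']
        else if letter = PySem.List.pyGetD "abcdefghijklmnopqrstuvwxyz".toList char ' ' then
          lowerWord ++ [letter]
        else lowerWord) acc
    = acc ++ (bFun letter).toList := by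
  have hstep : (fun (lowerWord : List Char) (char : Int) =>
        if letter = PySem.List.pyGetD "ABCDEFGHIJKLMNOPQRSTUVWXYZ".toList char ' ' then
          lowerWord ++ [PySem.List.pyGetD "abcdefghijklmnopqrstuvwxyz".toList char ' ']
        else if letter = PySem.List.pyGetD "abcdefghijklmnopqrstuvwxyz".toList char ' ' then
          lowerWord ++ [letter]
        else lowerWord)
      = (fun lowerWord char => lowerWord ++
        (if letter = PySem.List.pyGetD "ABCDEFGHIJKLMNOPQRSTUVWXYZ".toList char ' ' then
          [PySem.List.pyGetD "abcdefghijklmnopqrstuvwxyz".toList char ' ']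
        else if letter = PySem.List.pyGetD "abcdefghijklmnopqrstuvwxyz".toList char ' ' then
          [letter]
        else [])) := by
    funext lw ch; split_ifs <;> simp
  rw [hstep, PySem.List.foldl_append_eq_flatMap]
  have hc : Char.ofNat letter.toNat = letter := Char.ofNat_toNat letter
  have := key_ofNat letter.toNat h
  rw [hc] at this
  rw [this]

lemma dom_lt (c : Char) (h : pvDomChar c = true) : c.toNat < 127 := by
  simp [pvDomChar] at h; omega

lemma filterMap_eq_flatMap_toList (l : List Char) (f : Char → Option Char) :
    l.filterMap f = l.flatMap fun c => (f c).toList := by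
  induction l with
  | nil => rfl
  | cons x xs ih => cases hx : f x <;> simp [hx, ih]

-- The outer loop: fold over the word equals filterMap, given every char is in the domain.
lemma outer_eq (l : List Char) (h : ∀ c ∈ l, pvDomChar c = true) (acc : List Char) :
    l.foldl (fun lowerWord letter =>
      (PySem.List.pyRange 0 (("ABCDEFGHIJKLMNOPQRSTUVWXYZ".toList : List Char).length) 1).foldl
        (fun lowerWord char =>
          if letter = PySem.List.pyGetD "ABCDEFGHIJKLMNOPQRSTUVWXYZ".toList char ' ' then
            lowerWord ++ [PySem.List.pyGetD "abcdefghijklmnopqrstuvwxyz".toList char ' ']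
          else if letter = PySem.List.pyGetD "abcdefghijklmnopqrstuvwxyz".toList char ' ' then
            lowerWord ++ [letter]
          else lowerWord) lowerWord) acc
    = acc ++ l.filterMap bFun := by
  induction l generalizing acc with
  | nil => simp
  | cons x xs ih =>
    rw [List.foldl_cons, inner_append x (dom_lt x (h x (List.mem_cons_self))) acc,
      ih (fun c hc => h c (List.mem_cons_of_mem x hc))]
    rw [filterMap_eq_flatMap_toList, filterMap_eq_flatMap_toList]
    simp

-- ===== VERDICT (by name: the statement is the Claim_ definition above) =====
theorem convertToLower_spec : Claim_equal_convertToLower := by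
  intro word hdom
  unfold Spec_convertToLower convertToLower convertToLower_alt
  have hall : ∀ c ∈ word.toList, pvDomChar c = true := by
    simpa [Dom_convertToLower, pvDomStr, List.all_eq_true] using hdom
  rw [outer_eq word.toList hall []]
  rfl
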